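-- pv_equiv track=rewrite | github.com/AswinArun7/DSA-GRIND | Grind py/KV_displaced_elements.py | displaced
-- ===== SOURCE A (Python) =====
-- def displaced(arr):
--     n=len(arr)
--     l_max=[0]*n
--     r_min=[0]*n
--
--     l_max[0]=arr[0]
--     for i in range(1,n):
--         l_max[i]=max(l_max[i-1],arr[i])
--
--     r_min[n-1]=arr[n-1]
--     for i in range(n-2,-1,-1):
--         r_min[i]=min(r_min[i+1],arr[i])
--
--     d=[]
--     for i in range(1,n-1):
--         if l_max[i-1]>arr[i] and r_min[i+1]<arr[i]:
--             d.append(arr[i])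
--     return d
-- ===== SOURCE B (Python) =====
-- def displaced(arr):
--     n = len(arr)
--     left_max = arr[0]
--     cand = []
--     for i in range(1, n - 1):
--         x = arr[i]
--         if x < left_max:
--             cand.append((i, x))
--         else:
--             left_max = x
--     res = []
--     k = n - 1
--     m = arr[k]
--     for i, x in reversed(cand):
--         while k > i + 1:
--             k -= 1
--             m = min(m, arr[k])
--         if m < x:
--             res.append(x)
--     res.reverse()
--     return res
-- ===== Notes on version B (the rewrite author's own statement) =====
-- stated objective: alternative
-- what changed: B drops both precomputed extrema arrays: a forward pass with a running maximum collects only the candidate (index, value) pairs that fail the left test, then a backward two-pointer merge walks the candidates in reverse with a scalar running suffix minimum, appending survivors back-to-front and reversing at the end.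
import Mathlib
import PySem

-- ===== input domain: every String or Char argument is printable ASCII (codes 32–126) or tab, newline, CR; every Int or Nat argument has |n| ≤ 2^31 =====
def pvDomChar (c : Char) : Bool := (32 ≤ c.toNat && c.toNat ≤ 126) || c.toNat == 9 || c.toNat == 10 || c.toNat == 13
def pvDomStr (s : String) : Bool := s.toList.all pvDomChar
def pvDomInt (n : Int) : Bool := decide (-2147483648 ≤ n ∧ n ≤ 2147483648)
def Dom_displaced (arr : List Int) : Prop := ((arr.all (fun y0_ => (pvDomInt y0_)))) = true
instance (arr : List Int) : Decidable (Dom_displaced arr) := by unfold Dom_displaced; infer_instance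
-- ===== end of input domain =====

-- B is a different algorithm of the same O(n) cost: a forward pass collects only the candidates that fail the
-- left test (running maximum, no prefix-max array), then a backward two-pointer merge over the candidates with a
-- scalar running suffix minimum decides them and builds the output back-to-front (no suffix-min array).

-- ===== PORT A =====
def displaced (arr : List Int) : List Int :=
  let n : Int := PySem.List.len arr
  let lmax1 := PySem.List.pySetD (List.replicate n.toNat (0 : Int)) 0 (PySem.List.pyGetD arr 0 0)
  let lmax := (PySem.List.pyRange 1 n 1).foldl
      (fun l i => PySem.List.pySetD l i (max (PySem.List.pyGetD l (i - 1) 0) (PySem.List.pyGetD arr i 0))) lmax1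
  let rmin1 := PySem.List.pySetD (List.replicate n.toNat (0 : Int)) (n - 1) (PySem.List.pyGetD arr (n - 1) 0)
  let rmin := (PySem.List.pyRange (n - 2) (-1) (-1)).foldl
      (fun r i => PySem.List.pySetD r i (min (PySem.List.pyGetD r (i + 1) 0) (PySem.List.pyGetD arr i 0))) rmin1
  (PySem.List.pyRange 1 (n - 1) 1).foldl
      (fun d i =>
        if PySem.List.pyGetD lmax (i - 1) 0 > PySem.List.pyGetD arr i 0 ∧
           PySem.List.pyGetD rmin (i + 1) 0 < PySem.List.pyGetD arr i 0
        then d ++ [PySem.List.pyGetD arr i 0] else d) []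

-- ===== PORT B =====
-- the inner 'while k > i + 1: k -= 1; m = min(m, arr[k])' of Source B
def pvWhile (arr : List Int) (i k m : Int) : Int × Int :=
  if h : i + 1 < k then pvWhile arr i (k - 1) (min m (PySem.List.pyGetD arr (k - 1) 0))
  else (k, m)
termination_by (k - (i + 1)).toNat
decreasing_by omega

def displaced_alt (arr : List Int) : List Int :=
  let n : Int := PySem.List.len arr
  let p1 := (PySem.List.pyRange 1 (n - 1) 1).foldl
      (fun s i =>
        let x := PySem.List.pyGetD arr i 0
        if x < s.1 then (s.1, s.2 ++ [(i, x)]) else (x, s.2))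
      (PySem.List.pyGetD arr 0 0, ([] : List (Int × Int)))
  let fin := p1.2.reverse.foldl
      (fun st p =>
        let km := pvWhile arr p.1 st.2.1 st.2.2
        if km.2 < p.2 then (st.1 ++ [p.2], km) else (st.1, km))
      (([] : List Int), n - 1, PySem.List.pyGetD arr (n - 1) 0)
  fin.1.reverse

-- ===== PRECONDITION & SPEC =====
-- Pre_ excludes only the empty list, on which A raises IndexError (arr[0]); B raises IndexError there too.
def Pre_displaced (arr : List Int) : Prop := arr ≠ []
instance (arr : List Int) : Decidable (Pre_displaced arr) := by unfold Pre_displaced; infer_instance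
def pvWitness_displaced : List Int := [3, 1, 2]

def Spec_displaced (arr : List Int) (out : List Int) : Prop := out = displaced_alt arr
instance (arr : List Int) (out : List Int) : Decidable (Spec_displaced arr out) := by unfold Spec_displaced; infer_instance

-- ===== CLAIM (what is proved, stated in full; the proofs are below) =====
def Claim_equal_displaced : Prop := ∀ (arr : List Int), Dom_displaced arr → Pre_displaced arr → Spec_displaced arr (displaced arr)

-- ===== LEMMAS AND PROOFS =====

-- prefix maximum of arr[0..k] (the value A stores in l_max[k] and B tracks in left_max)
def pvPm (a : List Int) : Nat → Int
  | 0 => a.getD 0 0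
  | k + 1 => max (pvPm a k) (a.getD (k + 1) 0)

-- suffix minimum of arr[k..n-1] (the value A stores in r_min[k] and B tracks in m)
def pvSmin (a : List Int) (k : Nat) : Int :=
  if a.length - 1 ≤ k then a.getD k 0
  else min (pvSmin a (k + 1)) (a.getD k 0)
termination_by a.length - k
decreasing_by omega

lemma pvSmin_last (a : List Int) (k : Nat) (h : a.length - 1 ≤ k) : pvSmin a k = a.getD k 0 := by
  rw [pvSmin, if_pos h]

lemma pvSmin_step (a : List Int) (k : Nat) (h : k < a.length - 1) :
    pvSmin a k = min (pvSmin a (k + 1)) (a.getD k 0) := by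
  rw [pvSmin, if_neg (by omega)]

-- A's l_max-building fold, parametrized by the loop bound m
def pvLmax (arr : List Int) (m : Nat) : List Int :=
  (PySem.List.pyRange 1 (m : Int) 1).foldl
    (fun l i => PySem.List.pySetD l i (max (PySem.List.pyGetD l (i - 1) 0) (PySem.List.pyGetD arr i 0)))
    (PySem.List.pySetD (List.replicate arr.length (0 : Int)) 0 (PySem.List.pyGetD arr 0 0))

lemma pvLmax_succ (arr : List Int) (m : Nat) (h1 : 1 ≤ m) :
    pvLmax arr (m + 1) = PySem.List.pySetD (pvLmax arr m) (m : Int)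
      (max (PySem.List.pyGetD (pvLmax arr m) ((m : Int) - 1) 0) (PySem.List.pyGetD arr (m : Int) 0)) := by
  unfold pvLmax
  rw [show ((m + 1 : Nat) : Int) = (m : Int) + 1 by push_cast; ring,
      PySem.List.pyRange_one_succ_right (by exact_mod_cast h1), List.foldl_append]
  rfl

-- the array A builds holds the prefix maxima
lemma pvLmax_char (arr : List Int) (m : Nat) (h1 : 1 ≤ m) (hm : m ≤ arr.length) :
    (pvLmax arr m).length = arr.length ∧
    ∀ k : Nat, k < m → (pvLmax arr m).getD k 0 = pvPm arr k := by
  induction m with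
  | zero => omega
  | succ m ih =>
    by_cases hm1 : m = 0
    · subst hm1
      have h0 : 0 < arr.length := by omega
      have he : pvLmax arr 1 = (List.replicate arr.length (0:Int)).set 0 (PySem.List.pyGetD arr 0 0) := by
        unfold pvLmax
        rw [show ((1:Nat):Int) = 1 by norm_num, PySem.List.pyRange_one_eq_nil (by norm_num)]
        simp [PySem.List.pySetD_of_nonneg]
      rw [he]
      constructor
      · simp
      · intro k hk
        interval_cases k
        simp [pvPm, PySem.List.pyGetD_zero, List.getD, h0]
    · have h1m : 1 ≤ m := by omega
      obtain ⟨ihl, ihv⟩ := ih h1m (by omega)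
      rw [pvLmax_succ arr m h1m]
      have hml : m < (pvLmax arr m).length := by omega
      have hcast : ((m : Int) - 1) = ((m - 1 : Nat) : Int) := by omega
      rw [hcast, PySem.List.pySetD_natCast, PySem.List.pyGetD_natCast]
      constructor
      · simp [ihl]
      · intro k hk
        by_cases hkm : k = m
        · subst hkm
          have hp : pvPm arr k = max (pvPm arr (k - 1)) (arr.getD k 0) := by
            cases k with
            | zero => omega
            | succ j => simp [pvPm]
          rw [hp, ← ihv (k-1) (by omega)]
          simp [List.getD, hml]
        · have hu : (((pvLmax arr m).set m (max ((pvLmax arr m).getD (m-1) 0) (PySem.List.pyGetD arr (m:Int) 0))).getD k 0) = (pvLmax arr m).getD k 0 := by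
            have hmk : ¬ m = k := by omega
            simp [List.getD, hmk]
          rw [hu, ihv k (by omega)]

-- the array A builds in its right-to-left pass holds the suffix minima
lemma pvRmin_fold (arr : List Int) (m : Nat) (hm : m ≤ arr.length - 1) :
    ∀ (r : List Int), r.length = arr.length →
    (∀ k : Nat, m ≤ k → k < arr.length → r.getD k 0 = pvSmin arr k) →
    (((PySem.List.pyRange ((m : Int) - 1) (-1) (-1)).foldl
        (fun r i => PySem.List.pySetD r i (min (PySem.List.pyGetD r (i + 1) 0) (PySem.List.pyGetD arr i 0))) r).length
       = arr.length ∧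
     ∀ k : Nat, k < arr.length →
       ((PySem.List.pyRange ((m : Int) - 1) (-1) (-1)).foldl
        (fun r i => PySem.List.pySetD r i (min (PySem.List.pyGetD r (i + 1) 0) (PySem.List.pyGetD arr i 0))) r).getD k 0
       = pvSmin arr k) := by
  induction m with
  | zero =>
    intro r hlen hinv
    rw [show ((0 : Nat) : Int) - 1 = -1 by norm_num, PySem.List.pyRange_neg_one_eq_nil (by norm_num)]
    exact ⟨hlen, fun k hk => hinv k (Nat.zero_le k) hk⟩
  | succ m ih =>
    intro r hlen hinv
    rw [show ((m + 1 : Nat) : Int) - 1 = (m : Int) by push_cast; ring,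
        PySem.List.pyRange_neg_one_cons (show (-1:Int) < (m:Int) by omega), List.foldl_cons]
    have hml : m < arr.length := by omega
    have hset : PySem.List.pySetD r (m : Int)
        (min (PySem.List.pyGetD r ((m : Int) + 1) 0) (PySem.List.pyGetD arr (m : Int) 0))
        = r.set m (min (r.getD (m + 1) 0) (arr.getD m 0)) := by
      rw [show ((m : Int) + 1) = ((m + 1 : Nat) : Int) by push_cast; ring,
          PySem.List.pySetD_natCast, PySem.List.pyGetD_natCast, PySem.List.pyGetD_natCast]
    rw [hset]
    apply ih (by omega)
    · simp [hlen]
    · intro k hk1 hk2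
      by_cases hkm : k = m
      · subst hkm
        rw [hinv (k + 1) (by omega) (by omega), pvSmin_step arr k (by omega)]
        have hkr : k < r.length := by omega
        simp [List.getD, hkr]
      · have : (r.set m (min (r.getD (m + 1) 0) (arr.getD m 0))).getD k 0 = r.getD k 0 := by
          have hmk : ¬ m = k := by omega
          simp [List.getD, hmk]
        rw [this, hinv k (by omega) hk2]

-- B's while loop runs the running minimum down from k to i+1
lemma pvWhile_smin (arr : List Int) (i : Int) (h0 : 0 ≤ i) :
    ∀ (j : Nat) (k : Int), k = i + 1 + (j : Int) → k ≤ (arr.length : Int) - 1 →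
    pvWhile arr i k (pvSmin arr k.toNat) = (i + 1, pvSmin arr (i.toNat + 1)) := by
  intro j
  induction j with
  | zero =>
    intro k hk _
    rw [pvWhile, dif_neg (by omega)]
    have h1 : k = i + 1 := by omega
    have h2 : k.toNat = i.toNat + 1 := by omega
    rw [h2, h1]
  | succ j ih =>
    intro k hk hkl
    have harg : min (pvSmin arr k.toNat) (PySem.List.pyGetD arr (k - 1) 0) = pvSmin arr (k - 1).toNat := by
      rw [show k - 1 = ((k.toNat - 1 : Nat) : Int) by omega, PySem.List.pyGetD_natCast, Int.toNat_natCast,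
          pvSmin_step arr (k.toNat - 1) (by omega), show k.toNat - 1 + 1 = k.toNat by omega]
    rw [pvWhile, dif_pos (by omega), harg]
    exact ih (k - 1) (by omega) (by omega)

-- A's output loop with a propositional branch, as a Bool filter
lemma foldl_append_if_prop (l : List Int) (c : Int → Prop) [DecidablePred c] (f : Int → Int) (acc : List Int) :
    l.foldl (fun d i => if c i then d ++ [f i] else d) acc
      = acc ++ (l.filter (fun i => decide (c i))).map f := by
  rw [← PySem.List.foldl_append_if (fun i => decide (c i)) f l acc]
  have : (fun (d : List Int) i => if (fun i => decide (c i)) i = true then d ++ [f i] else d)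
      = (fun (d : List Int) i => if c i then d ++ [f i] else d) := by
    funext d i
    by_cases h : c i <;> simp [h]
  rw [this]

-- with the two arrays holding the prefix maxima / suffix minima, A's filter condition is the pvPm/pvSmin one
lemma filterA_eq (arr lmax rmin : List Int)
    (hl : ∀ k : Nat, k < arr.length → lmax.getD k 0 = pvPm arr k)
    (hr : ∀ k : Nat, k < arr.length → rmin.getD k 0 = pvSmin arr k) :
    ((PySem.List.pyRange 1 ((arr.length - 1 : Nat) : Int) 1).filter
        (fun i => decide (PySem.List.pyGetD lmax (i - 1) 0 > PySem.List.pyGetD arr i 0 ∧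
                          PySem.List.pyGetD rmin (i + 1) 0 < PySem.List.pyGetD arr i 0)))
      = ((PySem.List.pyRange 1 ((arr.length - 1 : Nat) : Int) 1).filter
        (fun i => decide (pvPm arr (i.toNat - 1) > PySem.List.pyGetD arr i 0 ∧
                          pvSmin arr (i.toNat + 1) < PySem.List.pyGetD arr i 0))) := by
  apply List.filter_congr
  intro i hi
  obtain ⟨h1i, h2i⟩ := PySem.List.mem_pyRange_one.1 hi
  have hlen : 2 ≤ arr.length := by omega
  rw [show i - 1 = ((i.toNat - 1 : Nat) : Int) by omega,
      show i + 1 = ((i.toNat + 1 : Nat) : Int) by omega,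
      PySem.List.pyGetD_natCast, PySem.List.pyGetD_natCast,
      hl (i.toNat - 1) (by omega), hr (i.toNat + 1) (by omega)]

-- B's forward pass returns the running maximum and the candidate pairs
lemma phase1 (arr : List Int) (m : Nat) (h1 : 1 ≤ m) (hm : m ≤ arr.length) :
    (PySem.List.pyRange 1 (m : Int) 1).foldl
        (fun s i =>
          if PySem.List.pyGetD arr i 0 < s.1 then (s.1, s.2 ++ [(i, PySem.List.pyGetD arr i 0)])
          else (PySem.List.pyGetD arr i 0, s.2))
        (PySem.List.pyGetD arr 0 0, ([] : List (Int × Int)))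
      = (pvPm arr (m - 1),
         ((PySem.List.pyRange 1 (m : Int) 1).filter
             (fun i => decide (pvPm arr (i.toNat - 1) > PySem.List.pyGetD arr i 0))).map
           (fun i => (i, PySem.List.pyGetD arr i 0))) := by
  induction m with
  | zero => omega
  | succ m ih =>
    by_cases hm1 : m = 0
    · subst hm1
      rw [show ((1:Nat):Int) = 1 by norm_num, PySem.List.pyRange_one_eq_nil (by norm_num)]
      simp [pvPm, PySem.List.pyGetD_zero]
    · have h1m : 1 ≤ m := by omega
      rw [show ((m + 1 : Nat) : Int) = (m : Int) + 1 by push_cast; ring,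
          PySem.List.pyRange_one_succ_right (by exact_mod_cast h1m),
          List.foldl_append, ih h1m (by omega), List.filter_append, List.map_append]
      simp only [List.foldl_cons, List.foldl_nil, List.filter_cons, List.filter_nil,
        Int.toNat_natCast, PySem.List.pyGetD_natCast]
      have hp : pvPm arr m = max (pvPm arr (m - 1)) (arr.getD m 0) := by
        cases m with
        | zero => omega
        | succ j => simp [pvPm]
      by_cases hc : arr.getD m 0 < pvPm arr (m - 1)
      · rw [if_pos hc, show (decide (pvPm arr (m - 1) > arr.getD m 0)) = true from decide_eq_true hc]
        simp only [if_true, List.map_cons, List.map_nil, Nat.add_sub_cancel]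
        rw [hp, max_eq_left (le_of_lt hc)]
        simp [PySem.List.pyGetD_natCast]
      · rw [if_neg hc, show (decide (pvPm arr (m - 1) > arr.getD m 0)) = false from
              decide_eq_false hc]
        simp only [Bool.false_eq_true, if_false, List.map_nil, List.append_nil, Nat.add_sub_cancel]
        rw [hp, max_eq_right (not_lt.1 hc)]

-- B's backward merge keeps exactly the candidates whose suffix minimum is smaller
lemma phase2 (arr : List Int) :
    ∀ (L : List (Int × Int)) (res : List Int) (k : Int),
      List.Pairwise (fun a b => b.1 < a.1) L →
      (∀ p ∈ L, p.2 = PySem.List.pyGetD arr p.1 0 ∧ 0 ≤ p.1 ∧ p.1 + 1 ≤ k ∧ p.1 + 2 ≤ (arr.length : Int)) →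
      k ≤ (arr.length : Int) - 1 →
      (L.foldl
          (fun st p =>
            if (pvWhile arr p.1 st.2.1 st.2.2).2 < p.2 then (st.1 ++ [p.2], pvWhile arr p.1 st.2.1 st.2.2)
            else (st.1, pvWhile arr p.1 st.2.1 st.2.2))
          (res, k, pvSmin arr k.toNat)).1
        = res ++ (L.filter (fun p => decide (pvSmin arr (p.1.toNat + 1) < p.2))).map (fun p => p.2) := by
  intro L
  induction L with
  | nil => intro res k _ _ _; simp
  | cons p L ihL =>
    intro res k hpw hmem hk
    obtain ⟨hpx, hp0, hpk, hpn⟩ := hmem p (List.mem_cons_self ..)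
    have hw := pvWhile_smin arr p.1 hp0 (k - (p.1 + 1)).toNat k (by omega) (by omega)
    simp only [List.foldl_cons, hw]
    have hrec : ∀ res', (L.foldl
          (fun st p =>
            if (pvWhile arr p.1 st.2.1 st.2.2).2 < p.2 then (st.1 ++ [p.2], pvWhile arr p.1 st.2.1 st.2.2)
            else (st.1, pvWhile arr p.1 st.2.1 st.2.2))
          (res', p.1 + 1, pvSmin arr (p.1.toNat + 1))).1
        = res' ++ (L.filter (fun p => decide (pvSmin arr (p.1.toNat + 1) < p.2))).map (fun p => p.2) := by
      intro res'
      have hins := ihL res' (p.1 + 1) hpw.of_cons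
        (fun q hq => ⟨(hmem q (List.mem_cons_of_mem _ hq)).1,
          (hmem q (List.mem_cons_of_mem _ hq)).2.1,
          by have := (List.pairwise_cons.1 hpw).1 q hq; omega,
          (hmem q (List.mem_cons_of_mem _ hq)).2.2.2⟩) (by omega)
      rw [show (p.1 + 1).toNat = p.1.toNat + 1 by omega] at hins
      exact hins
    by_cases hc : pvSmin arr (p.1.toNat + 1) < p.2
    · rw [if_pos hc]
      simp only [List.filter_cons, decide_eq_true hc, if_true, List.map_cons]
      rw [hrec (res ++ [p.2]), List.append_assoc]
      rfl
    · rw [if_neg hc]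
      simp only [List.filter_cons, decide_eq_false hc, Bool.false_eq_true, if_false]
      exact hrec res

-- ===== VERDICT (by name: the statement is the Claim_ definition above) =====
theorem displaced_spec : Claim_equal_displaced := by
  intro arr _ hpre
  have hN : 1 ≤ arr.length := by
    cases arr with
    | nil => exact absurd rfl hpre
    | cons a t => simp
  unfold Spec_displaced displaced displaced_alt
  simp only [PySem.List.len_eq, Int.toNat_natCast]
  by_cases h2 : arr.length = 1
  · rw [PySem.List.pyRange_one_eq_nil (show ((arr.length : Int) - 1) ≤ 1 by omega)]
    simp
  · have h2' : 2 ≤ arr.length := by omega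
    have e1 : (arr.length : Int) - 1 = ((arr.length - 1 : Nat) : Int) := by omega
    have e2 : (arr.length : Int) - 2 = ((arr.length - 1 : Nat) : Int) - 1 := by omega
    simp only [e1, e2]
    have hl : ∀ k : Nat, k < arr.length →
        (List.foldl
          (fun l i => PySem.List.pySetD l i (max (PySem.List.pyGetD l (i - 1) 0) (PySem.List.pyGetD arr i 0)))
          (PySem.List.pySetD (List.replicate arr.length (0 : Int)) 0 (PySem.List.pyGetD arr 0 0))
          (PySem.List.pyRange 1 (arr.length : Int) 1)).getD k 0 = pvPm arr k :=
      (pvLmax_char arr arr.length (by omega) le_rfl).2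
    have hr := (pvRmin_fold arr (arr.length - 1) (by omega)
        (PySem.List.pySetD (List.replicate arr.length (0 : Int)) ((arr.length - 1 : Nat) : Int)
          (PySem.List.pyGetD arr ((arr.length - 1 : Nat) : Int) 0))
        (by rw [PySem.List.pySetD_natCast]; simp)
        (by intro k hk1 hk2
            have hkk : k = arr.length - 1 := by omega
            rw [PySem.List.pySetD_natCast, PySem.List.pyGetD_natCast, hkk, pvSmin_last arr _ le_rfl]
            have hkr : arr.length - 1 < arr.length := by omega
            rw [List.getD, List.getElem?_set_self (by simpa using hkr)]
            simp)).2
    rw [foldl_append_if_prop, filterA_eq arr _ _ hl hr, List.nil_append,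
        phase1 arr (arr.length - 1) (by omega) (by omega)]
    have hF : (List.filter (fun i => decide (pvPm arr (i.toNat - 1) > PySem.List.pyGetD arr i 0))
        (PySem.List.pyRange 1 ((arr.length - 1 : Nat) : Int) 1)).Pairwise (· < ·) :=
      List.Pairwise.filter _ (PySem.List.pairwise_lt_pyRange_one 1 _)
    have hpw : ((List.map (fun i => (i, PySem.List.pyGetD arr i 0))
        (List.filter (fun i => decide (pvPm arr (i.toNat - 1) > PySem.List.pyGetD arr i 0))
          (PySem.List.pyRange 1 ((arr.length - 1 : Nat) : Int) 1))).reverse).Pairwise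
        (fun a b : Int × Int => b.1 < a.1) := by
      rw [List.pairwise_reverse, List.pairwise_map]
      exact hF
    have hmem : ∀ p ∈ (List.map (fun i => (i, PySem.List.pyGetD arr i 0))
        (List.filter (fun i => decide (pvPm arr (i.toNat - 1) > PySem.List.pyGetD arr i 0))
          (PySem.List.pyRange 1 ((arr.length - 1 : Nat) : Int) 1))).reverse,
        p.2 = PySem.List.pyGetD arr p.1 0 ∧ 0 ≤ p.1 ∧ p.1 + 1 ≤ ((arr.length - 1 : Nat) : Int) ∧
          p.1 + 2 ≤ (arr.length : Int) := by
      intro p hp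
      rw [List.mem_reverse] at hp
      obtain ⟨i, hiF, rfl⟩ := List.mem_map.1 hp
      obtain ⟨hi1, hi2⟩ := PySem.List.mem_pyRange_one.1 (List.mem_of_mem_filter hiF)
      exact ⟨rfl, by omega, by omega, by omega⟩
    have e3 : PySem.List.pyGetD arr ((arr.length - 1 : Nat) : Int) 0
        = pvSmin arr (((arr.length - 1 : Nat) : Int)).toNat := by
      rw [PySem.List.pyGetD_natCast, Int.toNat_natCast, pvSmin_last arr _ le_rfl]
    rw [e3, phase2 arr _ [] ((arr.length - 1 : Nat) : Int) hpw hmem (by omega)]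
    simp only [List.nil_append, List.filter_reverse, List.map_reverse, List.reverse_reverse,
      List.filter_map, List.map_map, Function.comp, List.filter_filter]
    have hpred : ∀ i : Int,
        (decide (pvSmin arr (i.toNat + 1) < PySem.List.pyGetD arr i 0) &&
         decide (pvPm arr (i.toNat - 1) > PySem.List.pyGetD arr i 0))
        = decide (pvPm arr (i.toNat - 1) > PySem.List.pyGetD arr i 0 ∧
                  pvSmin arr (i.toNat + 1) < PySem.List.pyGetD arr i 0) := by
      intro i
      by_cases h1 : pvPm arr (i.toNat - 1) > PySem.List.pyGetD arr i 0 <;>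
        by_cases h2 : pvSmin arr (i.toNat + 1) < PySem.List.pyGetD arr i 0 <;>
        simp [h1, h2]
    simp only [hpred]
    rfl
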